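-- pv_equiv track=rewrite | github.com/BenFoley2021/citation_prediction_from_google_scholar | data_cleaning_and_analysis/select_sub_set.py | file_ops_get_authorsId_for_paper
-- ===== SOURCE A (Python) =====
-- def file_ops_get_authorsId_for_paper(temp_dict, accumulator, locations):
--     def organize_paper_author(papers):
--         for paper in papers:
--             if paper in accumulator:
--                 accumulator[paper] += " " + topKey
--             else:
--                 accumulator[paper] = topKey
--
--         return accumulator
--
--     for topKey in temp_dict.keys():
--         organize_paper_author(temp_dict[topKey][locations[0]])
--
--     return accumulator
-- ===== SOURCE B (Python) =====
-- def file_ops_get_authorsId_for_paper(temp_dict, accumulator, locations):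
--     # Collect author ids per paper into lists, then join once per paper.
--     groups = {}
--     for topKey, inner in temp_dict.items():
--         for paper in inner[locations[0]]:
--             if paper not in groups:
--                 groups[paper] = [accumulator[paper]] if paper in accumulator else []
--             groups[paper].append(topKey)
--     for paper, ids in groups.items():
--         accumulator[paper] = ' '.join(ids)
--     return accumulator
-- ===== Notes on version B (the rewrite author's own statement) =====
-- stated objective: alternative
-- what changed: Replaces A's single interleaved loop of incremental string concatenations into the accumulator with a two-pass collect-then-join: a paper->list-of-ids table is built first (seeded from any existing accumulator entry), then each paper's list is joined once and written back.
import Mathlib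
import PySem

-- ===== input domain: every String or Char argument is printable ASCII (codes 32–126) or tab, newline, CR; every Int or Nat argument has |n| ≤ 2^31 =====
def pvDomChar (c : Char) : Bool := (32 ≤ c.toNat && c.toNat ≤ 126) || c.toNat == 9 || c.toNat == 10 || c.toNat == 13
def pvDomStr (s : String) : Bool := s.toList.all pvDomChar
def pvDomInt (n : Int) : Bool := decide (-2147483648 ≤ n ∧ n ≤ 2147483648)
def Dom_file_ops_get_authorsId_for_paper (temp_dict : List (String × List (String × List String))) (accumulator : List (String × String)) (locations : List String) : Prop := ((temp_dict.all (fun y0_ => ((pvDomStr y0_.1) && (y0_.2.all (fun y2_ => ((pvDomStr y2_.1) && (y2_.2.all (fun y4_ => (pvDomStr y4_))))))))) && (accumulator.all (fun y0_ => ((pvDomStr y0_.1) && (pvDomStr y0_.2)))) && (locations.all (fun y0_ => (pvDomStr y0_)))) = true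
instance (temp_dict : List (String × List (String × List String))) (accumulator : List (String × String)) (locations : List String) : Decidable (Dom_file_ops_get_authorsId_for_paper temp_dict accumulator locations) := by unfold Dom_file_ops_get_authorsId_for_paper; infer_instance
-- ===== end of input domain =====

-- B replaces A's single interleaved loop of incremental string concatenations with a
-- collect-then-join two-pass (paper -> list of author ids, then one join per paper).
-- In Python both A and B mutate the caller's accumulator dict; the equivalence proved
-- here is about the returned mapping (which is that same dict).

-- ===== PORT A =====
-- literal port of A: fold over temp_dict's entries (its keys with their values);
-- the inner loop extends or creates the accumulator string for each paper
def file_ops_get_authorsId_for_paper (temp_dict : List (String × List (String × List String))) (accumulator : List (String × String)) (locations : List String) : List (String × String) :=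
  (temp_dict.foldl
    (fun (acc : PySem.Dict String String) e =>
      (((PySem.Dict.mk e.2).getD (locations.headD "") []).foldl
        (fun acc paper =>
          if acc.contains paper then
            acc.insert paper (acc.getD paper "" ++ " " ++ e.1)
          else
            acc.insert paper e.1)
        acc))
    (PySem.Dict.mk accumulator)).items

-- ===== PORT B =====
-- literal port of B: first pass builds groups : paper -> list of ids (seeded from the
-- existing accumulator entry, if any); second pass joins each list once and writes back
def file_ops_get_authorsId_for_paper_alt (temp_dict : List (String × List (String × List String))) (accumulator : List (String × String)) (locations : List String) : List (String × String) :=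
  let acc0 : PySem.Dict String String := PySem.Dict.mk accumulator
  let groups : PySem.Dict String (List String) :=
    temp_dict.foldl
      (fun g e =>
        (((PySem.Dict.mk e.2).getD (locations.headD "") []).foldl
          (fun g paper =>
            g.insert paper
              ((match g.get? paper with
                | some l => l
                | none =>
                  match acc0.get? paper with
                  | some v => [v]
                  | none => []) ++ [e.1]))
          g))
      PySem.Dict.empty
  (groups.items.foldl (fun acc q => acc.insert q.1 (PySem.Str.join " " q.2)) acc0).items

-- ===== PRECONDITION & SPEC =====
-- Pre_ excludes exactly the inputs where A raises: locations = [] while temp_dict is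
-- non-empty (IndexError on locations[0]), or some temp_dict value lacking the key
-- locations[0] (KeyError).
def Pre_file_ops_get_authorsId_for_paper (temp_dict : List (String × List (String × List String))) (accumulator : List (String × String)) (locations : List String) : Prop :=
  (temp_dict = [] ∨ locations ≠ []) ∧
  ∀ e ∈ temp_dict, locations.headD "" ∈ e.2.map (·.1)
instance (temp_dict : List (String × List (String × List String))) (accumulator : List (String × String)) (locations : List String) : Decidable (Pre_file_ops_get_authorsId_for_paper temp_dict accumulator locations) := by unfold Pre_file_ops_get_authorsId_for_paper; infer_instance

def pvWitness_file_ops_get_authorsId_for_paper : (List (String × List (String × List String))) × (List (String × String)) × List String :=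
  ([("a1", [("loc", ["p", "q"])]), ("a2", [("loc", ["q"])])], [("p", "z")], ["loc"])

def Spec_file_ops_get_authorsId_for_paper (temp_dict : List (String × List (String × List String))) (accumulator : List (String × String)) (locations : List String) (out : List (String × String)) : Prop := out = file_ops_get_authorsId_for_paper_alt temp_dict accumulator locations
instance (temp_dict : List (String × List (String × List String))) (accumulator : List (String × String)) (locations : List String) (out : List (String × String)) : Decidable (Spec_file_ops_get_authorsId_for_paper temp_dict accumulator locations out) := by unfold Spec_file_ops_get_authorsId_for_paper; infer_instance

-- ===== CLAIM (what is proved, stated in full; the proofs are below) =====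
def Claim_equal_file_ops_get_authorsId_for_paper : Prop := ∀ (temp_dict : List (String × List (String × List String))) (accumulator : List (String × String)) (locations : List String), Dom_file_ops_get_authorsId_for_paper temp_dict accumulator locations → Pre_file_ops_get_authorsId_for_paper temp_dict accumulator locations → Spec_file_ops_get_authorsId_for_paper temp_dict accumulator locations (file_ops_get_authorsId_for_paper temp_dict accumulator locations)

-- ===== LEMMAS AND PROOFS =====

-- A's per-(paper, id) update of the accumulator
def pvStepA (acc : PySem.Dict String String) (pk : String × String) : PySem.Dict String String :=
  if acc.contains pk.1 then
    acc.insert pk.1 (acc.getD pk.1 "" ++ " " ++ pk.2)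
  else
    acc.insert pk.1 pk.2

-- B's per-(paper, id) update of the groups table
def pvStepG (acc0 : PySem.Dict String String) (g : PySem.Dict String (List String)) (pk : String × String) : PySem.Dict String (List String) :=
  g.insert pk.1
    ((match g.get? pk.1 with
      | some l => l
      | none =>
        match acc0.get? pk.1 with
        | some v => [v]
        | none => []) ++ [pk.2])

-- B's write-back pass
def pvWb (acc0 : PySem.Dict String String) (g : PySem.Dict String (List String)) : PySem.Dict String String :=
  g.items.foldl (fun acc q => acc.insert q.1 (PySem.Str.join " " q.2)) acc0

-- the (paper, id) work list both loop nests traverse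
def pvTasks (temp_dict : List (String × List (String × List String))) (loc : String) : List (String × String) :=
  temp_dict.flatMap (fun e => ((PySem.Dict.mk e.2).getD loc []).map (fun p => (p, e.1)))

theorem pvCharsJoin_append_singleton (sep : List Char) (l : List (List Char)) (hl : l ≠ [])
    (x : List Char) : PySem.Chars.join sep (l ++ [x]) = PySem.Chars.join sep l ++ sep ++ x := by
  induction l with
  | nil => exact absurd rfl hl
  | cons a t ih =>
    cases t with
    | nil => simp [PySem.Chars.join_singleton, PySem.Chars.join_cons_cons]
    | cons b t' =>
      rw [List.cons_append, List.cons_append, PySem.Chars.join_cons_cons,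
        PySem.Chars.join_cons_cons, ← List.cons_append, ih (by simp)]
      simp [List.append_assoc]

theorem pvJoin_singleton (x : String) : PySem.Str.join " " [x] = x := by
  apply String.toList_inj.mp
  simp [PySem.Str.toList_join, PySem.Chars.join_singleton]

theorem pvJoin_append_singleton (l : List String) (hl : l ≠ []) (x : String) :
    PySem.Str.join " " (l ++ [x]) = PySem.Str.join " " l ++ " " ++ x := by
  apply String.toList_inj.mp
  simp only [String.toList_append, PySem.Str.toList_join, List.map_append, List.map_cons,
    List.map_nil]
  exact pvCharsJoin_append_singleton _ _ (by simpa using hl) _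

-- two inserts at distinct keys commute when the second key is already present
theorem pvInsert_insert_comm {ν : Type} (a : PySem.Dict String ν) (k q : String) (u v : ν)
    (hne : k ≠ q) (hq : a.contains q = true) :
    (a.insert k u).insert q v = (a.insert q v).insert k u := by
  apply PySem.Dict.ext
  have hq' : (a.insert k u).contains q = true := by
    rw [PySem.Dict.contains_insert, hq]; simp
  by_cases hk : a.contains k = true
  · have hk' : (a.insert q v).contains k = true := by
      rw [PySem.Dict.contains_insert, hk]; simp
    rw [PySem.Dict.items_insert_of_contains _ _ hq', PySem.Dict.items_insert_of_contains _ _ hk,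
      PySem.Dict.items_insert_of_contains _ _ hk', PySem.Dict.items_insert_of_contains _ _ hq,
      List.map_map, List.map_map]
    apply List.map_congr_left
    intro p _
    simp only [Function.comp_apply]
    by_cases h1 : p.1 = k <;> by_cases h2 : p.1 = q <;>
      simp_all [Ne.symm hne]
  · have hk2 : a.contains k = false := by simpa using hk
    have hk' : (a.insert q v).contains k = false := by
      rw [PySem.Dict.contains_insert]
      simp [hne, hk2]
    rw [PySem.Dict.items_insert_of_contains _ _ hq', PySem.Dict.items_insert_of_not_contains _ _ hk2,
      PySem.Dict.items_insert_of_not_contains _ _ hk', PySem.Dict.items_insert_of_contains _ _ hq,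
      List.map_append]
    simp [hne]

-- lookup in the write-back of an items list with distinct keys
theorem pvGet_foldl_insert (l : List (String × List String)) (acc : PySem.Dict String String)
    (hnd : (l.map (·.1)).Nodup) (p : String) :
    (l.foldl (fun a q => a.insert q.1 (PySem.Str.join " " q.2)) acc).get? p =
      match (PySem.Dict.mk l).get? p with
      | some s => some (PySem.Str.join " " s)
      | none => acc.get? p := by
  induction l generalizing acc with
  | nil => simp [PySem.Dict.get?]
  | cons r t ih =>
    simp only [List.map_cons, List.nodup_cons] at hnd
    rw [List.foldl_cons, ih _ hnd.2, PySem.Dict.get?_mk_cons]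
    by_cases hp : r.1 = p
    · subst hp
      have : (PySem.Dict.mk t).get? r.1 = none := by
        rw [PySem.Dict.get?_eq_none_iff_not_mem_keys]
        simpa [PySem.Dict.keys, PySem.Dict.items] using hnd.1
      simp [this, PySem.Dict.get?_insert]
    · have : (r.1 == p) = false := by simp [hp]
      simp only [this, if_neg]
      cases h : (PySem.Dict.mk t).get? p with
      | some s => simp [h]
      | none => simp [h, PySem.Dict.get?_insert, Ne.symm hp]

-- folding past keys that avoid r commutes with an overwrite at r
theorem pvFoldl_insert_absent (t : List (String × List String)) (a : PySem.Dict String String)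
    (r : String) (v : String) (hr : r ∉ t.map (·.1)) (ha : a.contains r = true) :
    t.foldl (fun a q => a.insert q.1 (PySem.Str.join " " q.2)) (a.insert r v) =
      (t.foldl (fun a q => a.insert q.1 (PySem.Str.join " " q.2)) a).insert r v := by
  induction t generalizing a with
  | nil => rfl
  | cons s t' ih =>
    simp only [List.map_cons, List.mem_cons, not_or] at hr
    have hs : s.1 ≠ r := fun h => hr.1 (by simp [h])
    rw [List.foldl_cons, List.foldl_cons,
      ← pvInsert_insert_comm a s.1 r (PySem.Str.join " " s.2) v hs ha,
      ih _ hr.2 (by rw [PySem.Dict.contains_insert, ha]; simp)]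

-- write-back of a value-replaced items list = write-back then one overwrite
theorem pvFoldl_insert_replace (l : List (String × List String)) (acc : PySem.Dict String String)
    (hnd : (l.map (·.1)).Nodup) (p : String) (hp : p ∈ l.map (·.1)) (w : List String) :
    (l.map (fun r => if r.1 == p then (p, w) else r)).foldl
        (fun a q => a.insert q.1 (PySem.Str.join " " q.2)) acc =
      (l.foldl (fun a q => a.insert q.1 (PySem.Str.join " " q.2)) acc).insert p
        (PySem.Str.join " " w) := by
  induction l generalizing acc with
  | nil => simp at hp
  | cons r t ih =>
    simp only [List.map_cons, List.nodup_cons] at hnd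
    by_cases hr : r.1 = p
    · subst hr
      have hmap : t.map (fun r' => if r'.1 == r.1 then (r.1, w) else r') = t := by
        conv_rhs => rw [← List.map_id t]
        apply List.map_congr_left
        intro x hx
        have : x.1 ≠ r.1 := fun h => hnd.1 (h ▸ List.mem_map_of_mem hx)
        simp [this]
      have hnotmem : r.1 ∉ t.map (·.1) := hnd.1
      simp only [List.map_cons, BEq.rfl, if_pos, List.foldl_cons, hmap]
      rw [← pvFoldl_insert_absent t (acc.insert r.1 (PySem.Str.join " " r.2)) r.1
          (PySem.Str.join " " w) hnotmem (PySem.Dict.contains_insert_self _ _ _),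
        PySem.Dict.insert_insert_self]
    · have hp' : p ∈ t.map (·.1) := by
        rw [List.map_cons] at hp
        rcases List.mem_cons.mp hp with h | h
        · exact absurd h.symm hr
        · exact h
      have : (r.1 == p) = false := by simp [hr]
      simp only [List.map_cons, this, Bool.false_eq_true, List.foldl_cons]
      exact ih _ hnd.2 hp'

-- lookup in the write-back
theorem pvWb_get (acc0 : PySem.Dict String String) (g : PySem.Dict String (List String))
    (hnd : g.keys.Nodup) (p : String) :
    (pvWb acc0 g).get? p =
      match g.get? p with
      | some s => some (PySem.Str.join " " s)
      | none => acc0.get? p :=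
  pvGet_foldl_insert g.items acc0 hnd p

theorem pvWb_insert_contains (acc0 : PySem.Dict String String) (g : PySem.Dict String (List String))
    (hnd : g.keys.Nodup) (p : String) (hp : g.contains p = true) (w : List String) :
    pvWb acc0 (g.insert p w) = (pvWb acc0 g).insert p (PySem.Str.join " " w) := by
  unfold pvWb
  rw [PySem.Dict.items_insert_of_contains _ _ hp]
  exact pvFoldl_insert_replace g.items acc0 hnd p
    ((PySem.Dict.contains_iff_mem_keys g p).mp hp) w

theorem pvWb_insert_absent (acc0 : PySem.Dict String String) (g : PySem.Dict String (List String))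
    (p : String) (hp : g.contains p = false) (w : List String) :
    pvWb acc0 (g.insert p w) = (pvWb acc0 g).insert p (PySem.Str.join " " w) := by
  unfold pvWb
  rw [PySem.Dict.items_insert_of_not_contains _ _ hp, List.foldl_append]
  rfl

-- the key simulation step: one A-update of the written-back accumulator is the
-- write-back of one B-update of the groups table
theorem pvStep_sim (acc0 : PySem.Dict String String) (g : PySem.Dict String (List String))
    (pk : String × String) (hnd : g.keys.Nodup) (hv : ∀ q ∈ g.items, q.2 ≠ []) :
    pvStepA (pvWb acc0 g) pk = pvWb acc0 (pvStepG acc0 g pk) := by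
  unfold pvStepA pvStepG
  cases hg : g.get? pk.1 with
  | some l =>
    have hmem : (pk.1, l) ∈ g.items := PySem.Dict.mem_items_of_get?_eq_some g hg
    have hl : l ≠ [] := hv _ hmem
    have hcg : g.contains pk.1 = true := by
      rw [PySem.Dict.contains_eq_isSome_get?, hg]; rfl
    have hget : (pvWb acc0 g).get? pk.1 = some (PySem.Str.join " " l) := by
      rw [pvWb_get acc0 g hnd, hg]
    have hc : (pvWb acc0 g).contains pk.1 = true := by
      rw [PySem.Dict.contains_eq_isSome_get?, hget]; rfl
    rw [if_pos hc, PySem.Dict.getD_eq_get?_getD, hget, Option.getD_some,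
      pvWb_insert_contains acc0 g hnd pk.1 hcg,
      pvJoin_append_singleton l hl pk.2]
  | none =>
    have hcg : g.contains pk.1 = false := (PySem.Dict.get?_eq_none_iff_contains g pk.1).mp hg
    have hget : (pvWb acc0 g).get? pk.1 = acc0.get? pk.1 := by
      rw [pvWb_get acc0 g hnd, hg]
    cases ha : acc0.get? pk.1 with
    | some v =>
      have hc : (pvWb acc0 g).contains pk.1 = true := by
        rw [PySem.Dict.contains_eq_isSome_get?, hget, ha]; rfl
      rw [if_pos hc, PySem.Dict.getD_eq_get?_getD, hget, ha, Option.getD_some,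
        pvWb_insert_absent acc0 g pk.1 hcg,
        pvJoin_append_singleton [v] (by simp) pk.2, pvJoin_singleton v]
    | none =>
      have hc : (pvWb acc0 g).contains pk.1 = false := by
        rw [PySem.Dict.contains_eq_isSome_get?, hget, ha]; rfl
      rw [if_neg (by simp [hc]), pvWb_insert_absent acc0 g pk.1 hcg,
        List.nil_append, pvJoin_singleton pk.2]

-- invariants of the groups table
theorem pvStepG_nodup (acc0 : PySem.Dict String String) (g : PySem.Dict String (List String))
    (pk : String × String) (hnd : g.keys.Nodup) : (pvStepG acc0 g pk).keys.Nodup := by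
  unfold pvStepG
  exact PySem.Dict.nodup_keys_insert _ _ _ hnd

theorem pvStepG_nonempty (acc0 : PySem.Dict String String) (g : PySem.Dict String (List String))
    (pk : String × String) (hv : ∀ q ∈ g.items, q.2 ≠ []) :
    ∀ q ∈ (pvStepG acc0 g pk).items, q.2 ≠ [] := by
  unfold pvStepG
  intro q hq
  rcases (PySem.Dict.mem_items_insert _ _ _ _).mp hq with h | h
  · subst h; simp
  · exact hv _ h.1

-- main simulation over any work list
theorem pvMain (acc0 : PySem.Dict String String) (L : List (String × String)) :
    ∀ (g : PySem.Dict String (List String)), g.keys.Nodup → (∀ q ∈ g.items, q.2 ≠ []) →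
      L.foldl pvStepA (pvWb acc0 g) = pvWb acc0 (L.foldl (pvStepG acc0) g) := by
  induction L with
  | nil => intro g _ _; rfl
  | cons pk L ih =>
    intro g hnd hv
    rw [List.foldl_cons, List.foldl_cons, pvStep_sim acc0 g pk hnd hv]
    exact ih _ (pvStepG_nodup acc0 g pk hnd) (pvStepG_nonempty acc0 g pk hv)

-- the ports are their loop nests over the shared work list
theorem pvPortA_eq (temp_dict : List (String × List (String × List String)))
    (accumulator : List (String × String)) (locations : List String) :
    file_ops_get_authorsId_for_paper temp_dict accumulator locations =
      ((pvTasks temp_dict (locations.headD "")).foldl pvStepA (PySem.Dict.mk accumulator)).items := by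
  unfold file_ops_get_authorsId_for_paper pvTasks pvStepA
  rw [List.foldl_flatMap]
  simp only [List.foldl_map]

theorem pvPortB_eq (temp_dict : List (String × List (String × List String)))
    (accumulator : List (String × String)) (locations : List String) :
    file_ops_get_authorsId_for_paper_alt temp_dict accumulator locations =
      (pvWb (PySem.Dict.mk accumulator)
        ((pvTasks temp_dict (locations.headD "")).foldl
          (pvStepG (PySem.Dict.mk accumulator)) PySem.Dict.empty)).items := by
  unfold file_ops_get_authorsId_for_paper_alt pvTasks pvStepG pvWb
  rw [List.foldl_flatMap]
  simp only [List.foldl_map]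

-- ===== VERDICT (by name: the statement is the Claim_ definition above) =====
theorem file_ops_get_authorsId_for_paper_spec : Claim_equal_file_ops_get_authorsId_for_paper := by
  intro temp_dict accumulator locations _ _
  unfold Spec_file_ops_get_authorsId_for_paper
  rw [pvPortA_eq, pvPortB_eq]
  congr 1
  have h0 : pvWb (PySem.Dict.mk accumulator) PySem.Dict.empty = PySem.Dict.mk accumulator := rfl
  rw [← h0]
  exact pvMain (PySem.Dict.mk accumulator) (pvTasks temp_dict (locations.headD ""))
    PySem.Dict.empty (PySem.Dict.nodup_keys_empty) (fun q hq => absurd hq (by simp [PySem.Dict.empty]))
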